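-- pv_equiv track=rewrite | github.com/knrobitaille/Advent-of-Code | 2020/Day 14/DockingDataB.py | get_key_combos
-- ===== SOURCE A (Python) =====
-- def get_key_combos(masked_key):
--     combinations = 2 ** masked_key.count('X')
--     combos = []
--     for n in range(combinations):
--         combos.append((bin(n)[2:].zfill(masked_key.count('X'))))
--     key_combos = []
--     for combo in combos:
--         count = 0
--         new_key = ''
--         for i in masked_key:
--             if i != 'X':
--                 new_key += i
--             else:
--                 new_key += combo[count]
--                 count += 1
--         key_combos.append(new_key)
--     return key_combos
-- ===== SOURCE B (Python) =====
-- def get_key_combos(masked_key):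
--     # Left-to-right expansion of the mask: each non-'X' char is appended to every
--     # partial key; each 'X' doubles the list with '0' then '1' (counting order).
--     keys = ['']
--     for c in masked_key:
--         if c != 'X':
--             keys = [k + c for k in keys]
--         else:
--             keys = [k + b for k in keys for b in ('0', '1')]
--     return keys
-- ===== Notes on version B (the rewrite author's own statement) =====
-- stated objective: alternative
-- what changed: Replaces the integer enumeration with bin/zfill formatting plus a count-indexed substitution pass by a single left-to-right expansion over the mask that appends each fixed character to every partial key and doubles the list at each wildcard, zero-branch before one-branch.
import Mathlib
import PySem

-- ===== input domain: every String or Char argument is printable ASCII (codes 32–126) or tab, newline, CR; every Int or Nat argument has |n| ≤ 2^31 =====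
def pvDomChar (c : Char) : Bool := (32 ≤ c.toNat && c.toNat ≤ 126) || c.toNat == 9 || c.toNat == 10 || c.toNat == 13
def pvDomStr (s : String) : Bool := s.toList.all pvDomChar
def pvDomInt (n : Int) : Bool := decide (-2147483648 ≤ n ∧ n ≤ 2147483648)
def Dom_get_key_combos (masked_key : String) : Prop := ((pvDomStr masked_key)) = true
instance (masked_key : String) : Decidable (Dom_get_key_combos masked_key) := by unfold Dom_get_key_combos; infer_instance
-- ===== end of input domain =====

-- B replaces A's integer enumeration + zfill + count-indexed substitution by a single
-- left-to-right doubling expansion over the mask (alternative decomposition, same output order).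

-- ===== PORT A =====
def get_key_combos (masked_key : String) : List String :=
  let combinations : Int := 2 ^ (PySem.Str.count masked_key "X")
  let combos : List String :=
    (PySem.List.pyRange 0 combinations 1).foldl
      (fun acc n =>
        acc ++ [PySem.Str.zfill (PySem.Str.slice (PySem.Int.pyBin n) (some 2) none)
                  ((PySem.Str.count masked_key "X" : Nat) : Int)]) []
  combos.foldl
    (fun key_combos combo =>
      let st := masked_key.toList.foldl
        (fun (st : Nat × List Char) i =>
          if i ≠ 'X' then (st.1, st.2 ++ [i])
          -- combo[count]: IndexError unreachable (combo always has ≥ count('X') chars)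
          else (st.1 + 1, st.2 ++ [PySem.List.pyGetD combo.toList (st.1 : Int) 'X']))
        (0, [])
      key_combos ++ [String.ofList st.2]) []

-- ===== PORT B =====
def get_key_combos_alt (masked_key : String) : List String :=
  (masked_key.toList.foldl
    (fun keys c =>
      if c ≠ 'X' then keys.map (fun k => k ++ [c])
      else keys.flatMap (fun k => [k ++ ['0'], k ++ ['1']]))
    [([] : List Char)]).map String.ofList

-- ===== PRECONDITION & SPEC =====
def Spec_get_key_combos (masked_key : String) (out : List String) : Prop := out = get_key_combos_alt masked_key
instance (masked_key : String) (out : List String) : Decidable (Spec_get_key_combos masked_key out) := by unfold Spec_get_key_combos; infer_instance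

-- ===== CLAIM (what is proved, stated in full; the proofs are below) =====
def Claim_equal_get_key_combos : Prop := ∀ (masked_key : String), Dom_get_key_combos masked_key → Spec_get_key_combos masked_key (get_key_combos masked_key)

-- ===== LEMMAS AND PROOFS =====

/-- Number of 'X' characters. -/
def cntX (cs : List Char) : Nat := cs.countP (fun c => c == 'X')

/-- MSB-first k-bit binary rendering of n (low bit appended last). -/
def bits : Nat → Nat → List Char
  | 0, _ => []
  | k+1, n => bits k (n / 2) ++ [Nat.digitChar (n % 2)]

/-- Substitute the chars of q (as a queue) for the 'X's of cs. -/
def substL : List Char → List Char → List Char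
  | [], _ => []
  | c :: cs, q => if c ≠ 'X' then c :: substL cs q else (q.head?.getD 'X') :: substL cs q.tail

/-- The common specification: the keys in binary-counting order. -/
def specKC (cs : List Char) : List (List Char) :=
  (List.range (2 ^ cntX cs)).map (fun n => substL cs (bits (cntX cs) n))

theorem length_bits (k : Nat) : ∀ n, (bits k n).length = k := by
  induction k with
  | zero => intro n; rfl
  | succ k ih => intro n; simp [bits, ih]

theorem cntX_append (xs ys : List Char) : cntX (xs ++ ys) = cntX xs + cntX ys := by
  simp [cntX]

theorem substL_append (xs ys q : List Char) :
    substL (xs ++ ys) q = substL xs q ++ substL ys (q.drop (cntX xs)) := by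
  induction xs generalizing q with
  | nil => simp [substL, cntX]
  | cons c cs ih =>
    by_cases hc : c = 'X'
    · subst hc
      simp only [List.cons_append, substL, ne_eq, not_true_eq_false, if_false, ih, cntX,
        List.countP_cons, List.cons_append]
      simp [Nat.add_comm]
    · simp [List.cons_append, substL, hc, ih, cntX]

theorem substL_prefix (xs q1 q2 : List Char) (h : cntX xs ≤ q1.length) :
    substL xs (q1 ++ q2) = substL xs q1 := by
  induction xs generalizing q1 with
  | nil => simp [substL]
  | cons c cs ih =>
    by_cases hc : c = 'X'
    · subst hc
      obtain ⟨a, q1', rfl⟩ : ∃ a q1', q1 = a :: q1' := by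
        cases q1 with
        | nil => simp [cntX, List.countP_cons] at h
        | cons a t => exact ⟨a, t, rfl⟩
      simp only [substL, ne_eq, not_true_eq_false, if_false, List.cons_append, List.head?_cons,
        List.tail_cons]
      have hle : cntX cs ≤ q1'.length := by
        simp only [cntX, List.countP_cons, List.length_cons, beq_self_eq_true, if_true] at h ⊢; omega
      rw [ih _ hle]
    · simp only [substL, if_pos hc]
      rw [ih]
      simp [cntX, hc] at h ⊢
      omega

theorem substL_of_cntX_zero (xs q : List Char) (h : cntX xs = 0) : substL xs q = xs := by
  induction xs generalizing q with
  | nil => rfl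
  | cons c cs ih =>
    simp only [cntX, List.countP_cons] at h
    have hc : ¬ c = 'X' := by by_cases hx : c = 'X' <;> simp [hx] at h ⊢
    have hcs : cntX cs = 0 := by by_cases hx : c = 'X' <;> simp [hx] at h <;> simpa [cntX] using h
    simp [substL, hc, ih _ hcs]

theorem countgo_eq (fuel : Nat) : ∀ (cs : List Char) (acc : Nat), cs.length ≤ fuel →
    PySem.Chars.count.go ['X'] fuel cs acc = acc + cntX cs := by
  induction fuel with
  | zero => intro cs acc h; interval_cases h' : cs.length <;> first
      | (cases cs with | nil => simp [PySem.Chars.count.go, cntX] | cons c t => simp at h')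
  | succ f ih =>
    intro cs acc h
    cases cs with
    | nil => simp [PySem.Chars.count.go, cntX]
    | cons c t =>
      rw [PySem.Chars.count.go]
      by_cases hc : c = 'X'
      · subst hc
        simp only [List.isPrefixOf, beq_self_eq_true, Bool.true_and, List.isPrefixOf_nil_left,
          if_true, List.length_singleton, List.drop_one, List.tail_cons]
        rw [ih t (acc+1) (by simpa using Nat.le_of_succ_le_succ (by simpa using h))]
        simp [cntX, List.countP_cons]
        omega
      · have : (['X'].isPrefixOf (c :: t)) = false := by
          simp [List.isPrefixOf]; exact fun hh => (hc (by simpa using hh.symm)).elim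
        simp only [this, Bool.false_eq_true, if_false]
        rw [ih t acc (by simpa using Nat.le_of_succ_le_succ (by simpa using h))]
        simp [cntX, List.countP_cons, hc]

theorem count_X_eq_cntX (cs : List Char) : PySem.Chars.count cs ['X'] = cntX cs := by
  rw [PySem.Chars.count]
  simp only [List.isEmpty_cons, if_false, Bool.false_eq_true]
  rw [countgo_eq cs.length cs 0 le_rfl]; omega

theorem zfill_no_sign (cs : List Char) (k : Nat) (hne : cs ≠ [])
    (hh : ¬ (cs.head? = some '+' ∨ cs.head? = some '-')) :
    PySem.Chars.zfill cs (k : Int) = List.replicate (k - cs.length) '0' ++ cs := by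
  by_cases hle : (k : Int) ≤ (cs.length : Int)
  · unfold PySem.Chars.zfill
    rw [if_pos hle]
    have : k - cs.length = 0 := by omega
    simp [this]
  · cases cs with
    | nil => simp at hne
    | cons c rest =>
      have hc : ¬ (c = '+' ∨ c = '-') := by simpa using hh
      simp only [PySem.Chars.zfill, if_neg hle, if_neg hc, Int.toNat_natCast]

theorem toDigits_head_not_sign (n : Nat) :
    ¬ ((Nat.toDigits 2 n).head? = some '+' ∨ (Nat.toDigits 2 n).head? = some '-') := by
  rintro (h | h) <;>
  · have hmem : _ ∈ Nat.toDigits 2 n := List.mem_of_mem_head? h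
    have := Nat.isDigit_of_mem_toDigits (by norm_num) (by norm_num) hmem
    simp [Char.isDigit] at this

theorem toDigits_ne_nil (n : Nat) : Nat.toDigits 2 n ≠ [] :=
  List.ne_nil_of_length_pos Nat.length_toDigits_pos

theorem bits_eq_replicate_toDigits (k : Nat) (hk : 1 ≤ k) :
    ∀ n, n < 2 ^ k →
      bits k n = List.replicate (k - (Nat.toDigits 2 n).length) '0' ++ Nat.toDigits 2 n := by
  induction k, hk using Nat.le_induction with
  | base =>
    intro n hn
    have h2 : n < 2 := by simpa using hn
    rw [Nat.toDigits_of_lt_base h2]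
    simp [bits, Nat.mod_eq_of_lt h2, Nat.div_eq_of_lt h2]
  | succ k hk ih =>
    intro n hn
    have hdiv : n / 2 < 2 ^ k := by
      have := Nat.pow_succ 2 k
      omega
    by_cases h2 : n < 2
    · have hd : n / 2 = 0 := Nat.div_eq_of_lt h2
      have hz : Nat.toDigits 2 0 = ['0'] := by decide
      rw [bits, hd, ih 0 (by positivity), Nat.toDigits_of_lt_base h2,
        Nat.mod_eq_of_lt h2, hz]
      simp only [List.length_singleton, List.append_assoc, List.singleton_append]
      rw [show List.replicate (k - 1) '0' ++ '0' :: [Nat.digitChar n] =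
        (List.replicate (k - 1) '0' ++ ['0']) ++ [Nat.digitChar n] by simp,
        ← List.replicate_succ' (n := k - 1)]
      have : k - 1 + 1 = k := by omega
      rw [this]
      have : k + 1 - 1 = k := by omega
      rw [this]
    · push_neg at h2
      rw [bits, Nat.toDigits_of_base_le (by norm_num) h2, ih _ hdiv]
      simp only [List.length_append, List.length_singleton, List.append_assoc]
      have harg : k - (Nat.toDigits 2 (n / 2)).length = k + 1 - ((Nat.toDigits 2 (n / 2)).length + 1) := by
        omega
      rw [← harg]

theorem zfill_toDigits_eq_bits (k n : Nat) (hk : 1 ≤ k) (hn : n < 2 ^ k) :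
    PySem.Chars.zfill (Nat.toDigits 2 n) (k : Int) = bits k n := by
  rw [zfill_no_sign _ _ (toDigits_ne_nil n) (toDigits_head_not_sign n),
    bits_eq_replicate_toDigits k hk n hn]

theorem range_twoMul_map (m : Nat) {α : Type} (f : Nat → α) :
    (List.range (2 * m)).map f = (List.range m).flatMap (fun q => [f (2 * q), f (2 * q + 1)]) := by
  induction m with
  | zero => simp
  | succ m ih =>
    have h2 : 2 * (m + 1) = (2 * m + 1) + 1 := by ring
    rw [h2, List.range_succ, List.range_succ, List.range_succ]
    simp only [List.map_append, List.flatMap_append, ih]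
    simp [List.flatMap_singleton]

theorem foldsub (q : List Char) (cs : List Char) :
    ∀ (c0 : Nat) (acc : List Char),
      cs.foldl
        (fun (st : Nat × List Char) i =>
          if i ≠ 'X' then (st.1, st.2 ++ [i])
          else (st.1 + 1, st.2 ++ [PySem.List.pyGetD q (st.1 : Int) 'X'])) (c0, acc)
      = (c0 + cntX cs, acc ++ substL cs (q.drop c0)) := by
  induction cs with
  | nil => intro c0 acc; simp [cntX, substL]
  | cons c cs ih =>
    intro c0 acc
    by_cases hc : c = 'X'
    · subst hc
      simp only [List.foldl_cons, ne_eq, not_true_eq_false, if_false, ih]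
      have hget : PySem.List.pyGetD q (c0 : Int) 'X' = (q.drop c0).head?.getD 'X' := by
        simp [PySem.List.pyGetD, PySem.List.pyGet?_natCast, ← List.head?_drop]
      rw [hget]
      simp only [substL, ne_eq, not_true_eq_false, if_false, cntX, List.countP_cons]
      rw [Prod.mk.injEq]
      refine ⟨by simp; omega, ?_⟩
      rw [List.tail_drop]
      simp
    · simp only [List.foldl_cons, ne_eq, hc, not_false_eq_true, if_true, ih]
      simp [substL, hc, cntX, List.countP_cons]

theorem substL_snoc_X (cs : List Char) (j : Nat) (hj : cntX cs = j) (q : List Char)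
    (hq : q.length = j) (d : Char) :
    substL (cs ++ ['X']) (q ++ [d]) = substL cs q ++ [d] := by
  rw [substL_append, hj, ← hq, List.drop_left]
  rw [substL_prefix cs q [d] (by omega)]
  rfl

theorem bits_succ_two_mul_add (j q d : Nat) (hd : d < 2) :
    bits (j + 1) (2 * q + d) = bits j q ++ [Nat.digitChar d] := by
  have h1 : (2 * q + d) / 2 = q := by omega
  have h2 : (2 * q + d) % 2 = d := by omega
  rw [bits, h1, h2]

theorem foldl_step_eq_spec (cs : List Char) :
    cs.foldl
      (fun keys c =>
        if c ≠ 'X' then keys.map (fun k => k ++ [c])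
        else keys.flatMap (fun k => [k ++ ['0'], k ++ ['1']]))
      [([] : List Char)] = specKC cs := by
  induction cs using List.reverseRecOn with
  | nil => simp [specKC, cntX, substL, bits, List.range_succ]
  | append_singleton cs c ih =>
    rw [List.foldl_append, List.foldl_cons, List.foldl_nil, ih]
    by_cases hc : c = 'X'
    · subst hc
      rw [if_neg (by simp)]
      have hcnt : cntX (cs ++ ['X']) = cntX cs + 1 := by
        rw [cntX_append]; rfl
      have hpow : 2 ^ (cntX cs + 1) = 2 * 2 ^ (cntX cs) := by ring
      simp only [specKC]
      rw [hcnt, hpow, range_twoMul_map, List.flatMap_map]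
      apply List.flatMap_congr
      intro q _
      have h0 : substL (cs ++ ['X']) (bits (cntX cs + 1) (2 * q)) =
          substL cs (bits (cntX cs) q) ++ ['0'] := by
        rw [show 2 * q = 2 * q + 0 by ring, bits_succ_two_mul_add _ _ 0 (by norm_num)]
        exact substL_snoc_X cs (cntX cs) rfl _ (length_bits _ _) _
      have h1 : substL (cs ++ ['X']) (bits (cntX cs + 1) (2 * q + 1)) =
          substL cs (bits (cntX cs) q) ++ ['1'] := by
        rw [bits_succ_two_mul_add _ _ 1 (by norm_num)]
        exact substL_snoc_X cs (cntX cs) rfl _ (length_bits _ _) _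
      rw [h0, h1]
    · rw [if_pos hc]
      have hcnt : cntX (cs ++ [c]) = cntX cs := by
        rw [cntX_append]
        simp [cntX, List.countP_cons, hc]
      simp only [specKC]
      rw [hcnt, List.map_map]
      apply List.map_congr_left
      intro n _
      simp only [Function.comp_apply]
      rw [substL_append]
      simp [substL, hc]

theorem b_eq_spec (s : String) :
    get_key_combos_alt s = (specKC s.toList).map String.ofList := by
  rw [get_key_combos_alt, foldl_step_eq_spec]

theorem combo_toList (K m : Nat) :
    (PySem.Str.zfill (PySem.Str.slice (PySem.Int.pyBin ((m : Nat) : Int)) (some 2) none)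
        ((K : Nat) : Int)).toList = PySem.Chars.zfill (Nat.toDigits 2 m) (K : Int) := by
  rw [PySem.Str.toList_zfill, PySem.Str.toList_slice]
  congr 1
  rw [PySem.Int.pyBin, String.toList_ofList, PySem.Int.toBinChars0b]
  rw [if_neg (by omega), Int.toNat_natCast]
  show PySem.List.slice ('0' :: 'b' :: Nat.toDigits 2 m) (some 2) none = _
  rw [PySem.List.slice_from _ (by norm_num)]
  rfl

theorem a_eq_spec (s : String) :
    get_key_combos s = (specKC s.toList).map String.ofList := by
  have hKc : PySem.Str.count s "X" = cntX s.toList := by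
    rw [PySem.Str.count]
    have : ("X" : String).toList = ['X'] := by decide
    rw [this, count_X_eq_cntX]
  unfold get_key_combos
  simp only [hKc]
  rw [PySem.List.foldl_append_singleton_eq_map, List.nil_append]
  have hpow : (2 : Int) ^ (cntX s.toList) = ((2 ^ (cntX s.toList) : Nat) : Int) := by push_cast; rfl
  rw [hpow, PySem.List.pyRange_zero_natCast,
    PySem.List.foldl_append_singleton_eq_map, List.nil_append, List.map_map, List.map_map,
    specKC, List.map_map]
  apply List.map_congr_left
  intro m hm
  rw [List.mem_range] at hm
  simp only [Function.comp_apply]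
  rw [foldsub]
  simp only [List.drop_zero, List.nil_append]
  congr 1
  rw [combo_toList]
  by_cases hK0 : cntX s.toList = 0
  · rw [substL_of_cntX_zero _ _ hK0, substL_of_cntX_zero _ _ hK0]
  · rw [zfill_toDigits_eq_bits _ _ (by omega) hm]

-- ===== VERDICT (by name: the statement is the Claim_ definition above) =====
theorem get_key_combos_spec : Claim_equal_get_key_combos := by
  intro s _
  unfold Spec_get_key_combos
  rw [a_eq_spec, b_eq_spec]
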